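-- pv_equiv track=rewrite | github.com/oils-for-unix/oils | lazylex/html.py | FindLineNum
-- ===== SOURCE A (Python) =====
-- def FindLineNum(s, error_pos):
--     # type: (str, int) -> int
--     current_pos = 0
--     line_num = 1
--     while True:
--         newline_pos = s.find('\n', current_pos)
--         #log('current = %d, N %d, line %d', current_pos, newline_pos, line_num)
--
--         if newline_pos == -1:  # this is the last line
--             return line_num
--         if newline_pos >= error_pos:
--             return line_num
--         line_num += 1
--         current_pos = newline_pos + 1
-- ===== SOURCE B (Python) =====
-- def FindLineNum(s, error_pos):
--     # type: (str, int) -> int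
--     line_num = 1
--     for ch in s[:max(error_pos, 0)]:
--         if ch == '\n':
--             line_num += 1
--     return line_num
-- ===== Notes on version B (the rewrite author's own statement) =====
-- stated objective: simpler
-- what changed: Replaces the repeated s.find('\n', pos) loop with a single counting pass over the clamped prefix s[:max(error_pos,0)], tallying newlines.
import Mathlib
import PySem

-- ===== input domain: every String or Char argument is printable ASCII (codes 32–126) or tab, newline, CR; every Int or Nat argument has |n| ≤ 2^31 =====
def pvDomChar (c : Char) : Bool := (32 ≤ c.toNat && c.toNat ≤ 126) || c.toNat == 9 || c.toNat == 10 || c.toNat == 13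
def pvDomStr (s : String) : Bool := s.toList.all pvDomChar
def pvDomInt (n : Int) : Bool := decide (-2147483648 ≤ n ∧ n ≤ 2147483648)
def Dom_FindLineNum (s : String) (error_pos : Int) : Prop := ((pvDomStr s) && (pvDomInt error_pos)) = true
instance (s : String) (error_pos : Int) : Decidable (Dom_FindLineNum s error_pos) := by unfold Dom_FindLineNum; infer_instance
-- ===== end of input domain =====

-- B replaces A's repeated find('\n', pos) loop with one counting pass over the clamped prefix (simpler; same cost).


-- ===== PORT A =====
-- A's `while True` loop; `fuel` only bounds the recursion (each step moves current_pos
-- strictly forward, so fuel = s.length from the top call is never exhausted).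
def FindLineNumLoop (s : String) (error_pos : Int) : Nat → Int → Int → Int
  | fuel, current_pos, line_num =>
    let newline_pos := PySem.Str.findFrom s "\n" current_pos
    if newline_pos == -1 then line_num
    else if error_pos ≤ newline_pos then line_num
    else
      match fuel with
      | 0 => line_num
      | fuel + 1 => FindLineNumLoop s error_pos fuel (newline_pos + 1) (line_num + 1)

def FindLineNum (s : String) (error_pos : Int) : Int :=
  FindLineNumLoop s error_pos s.toList.length 0 1

-- ===== PORT B =====
-- Source B: for ch in s[:max(error_pos, 0)]: if ch == '\n': line_num += 1
def FindLineNum_alt (s : String) (error_pos : Int) : Int :=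
  (PySem.List.slice s.toList none (some (max error_pos 0))).foldl
    (fun line_num ch => if ch == '\n' then line_num + 1 else line_num) 1

-- ===== PRECONDITION & SPEC =====
def Spec_FindLineNum (s : String) (error_pos : Int) (out : Int) : Prop := out = FindLineNum_alt s error_pos
instance (s : String) (error_pos : Int) (out : Int) : Decidable (Spec_FindLineNum s error_pos out) := by unfold Spec_FindLineNum; infer_instance

-- ===== CLAIM (what is proved, stated in full; the proofs are below) =====
def Claim_equal_FindLineNum : Prop := ∀ (s : String) (error_pos : Int), Dom_FindLineNum s error_pos → Spec_FindLineNum s error_pos (FindLineNum s error_pos)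

-- ===== LEMMAS AND PROOFS =====

-- elements of a taken prefix with no newline before index m
lemma count_take_zero_of_no_nl (t : List Char) (m : Nat)
    (h : ∀ i, i < m → ¬ ['\n'] <+: t.drop i) :
    ((t.take m).count '\n') = 0 := by
  rw [List.count_eq_zero]
  intro hmem
  obtain ⟨i, hi, hget⟩ := List.mem_iff_getElem.mp hmem
  rw [List.length_take] at hi
  have him : i < m := by omega
  have hit : i < t.length := by omega
  apply h i him
  have hdrop : t.drop i = t[i] :: t.drop (i + 1) := List.drop_eq_getElem_cons hit
  have hv : t[i] = '\n' := by
    have := List.getElem_take (xs := t) (i := i) (h := by rw [List.length_take]; omega)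
    rw [← this]; exact hget
  rw [hdrop, hv]
  exact ⟨t.drop (i + 1), rfl⟩

lemma loop_eq (s : String) (ep : Int) :
    ∀ (fuel cp : Nat) (ln : Int), s.toList.length - cp ≤ fuel → cp ≤ s.toList.length →
      FindLineNumLoop s ep fuel (cp : Int) ln
        = ln + (((s.toList.drop cp).take ((ep - cp).toNat)).count '\n' : Int) := by
  intro fuel
  induction fuel with
  | zero =>
    intro cp ln hfuel hcp
    have hcpe : cp = s.toList.length := by omega
    have hdrop : s.toList.drop cp = [] := by simp [hcpe]
    rw [FindLineNumLoop]
    have hff : PySem.Str.findFrom s "\n" (cp : Int) = -1 := by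
      rw [PySem.Str.findFrom_eq, PySem.Chars.findFrom_natCast _ _ _ hcp, hdrop]
      have h0 : PySem.Chars.find ([] : List Char) ['\n'] = -1 := by decide
      simp [h0]
    simp [hdrop]
  | succ fuel ih =>
    intro cp ln hfuel hcp
    rw [FindLineNumLoop]
    have hff := PySem.Chars.findFrom_natCast s.toList ['\n'] cp hcp
    set t := s.toList.drop cp with ht
    set j := PySem.Chars.find t ['\n'] with hj
    clear_value t j
    by_cases hfound : j = -1
    · -- no newline from cp on: A returns ln, and t has no newline at all
      have hne : ¬ ['\n'] <:+: t := (PySem.Chars.find_eq_neg_one_iff t ['\n']).mp (by rw [← hj]; exact hfound)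
      have hcnt : ((t.take ((ep - cp).toNat)).count '\n') = 0 := by
        apply count_take_zero_of_no_nl
        intro i _ hpre
        exact hne (hpre.isInfix.trans (List.drop_suffix i t).isInfix)
      have hffv : PySem.Str.findFrom s "\n" (cp : Int) = -1 := by
        rw [PySem.Str.findFrom_eq]
        have hsl : ("\n" : String).toList = ['\n'] := rfl
        rw [hsl, hff]; simp [hfound]
      simp only [hffv, beq_self_eq_true, if_true]
      rw [hcnt]; simp
    · have hj0 : 0 ≤ j := by
        have h := PySem.Chars.neg_one_le_find t ['\n']
        rw [← hj] at h; omega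
      obtain ⟨hpre, hmin⟩ := PySem.Chars.find_spec (s := t) (sub := ['\n']) (by rw [← hj]; exact hj0)
      rw [← hj] at hpre hmin
      obtain ⟨r, hr⟩ := hpre
      have hjlt : j.toNat < t.length := by
        have := congrArg List.length hr
        simp at this; omega
      have hnl : t[j.toNat] = '\n' := by
        have hc := List.drop_eq_getElem_cons hjlt
        rw [hc] at hr
        have : ('\n' :: r) = t[j.toNat] :: t.drop (j.toNat + 1) := by simpa using hr
        exact (List.cons.injEq _ _ _ _ ▸ this).1.symm
      have hlen : t.length = s.toList.length - cp := by rw [ht]; simp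
      have hffv : PySem.Str.findFrom s "\n" (cp : Int) = cp + j := by
        rw [PySem.Str.findFrom_eq]
        have hsl : ("\n" : String).toList = ['\n'] := rfl
        rw [hsl, hff]; simp [hfound]
      have hne1 : ((cp : Int) + j == -1) = false := by
        simp; omega
      simp only [hffv, hne1, Bool.false_eq_true, if_false]
      by_cases hstop : ep ≤ (cp : Int) + j
      · -- newline at/after error_pos: return ln; no newline strictly before in prefix
        have hcnt : ((t.take ((ep - cp).toNat)).count '\n') = 0 := by
          apply count_take_zero_of_no_nl
          intro i hi
          apply hmin
          omega
        rw [if_pos hstop, hcnt]; simp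
      · rw [not_le] at hstop
        have hrec : (cp : Int) + j + 1 = ((cp + j.toNat + 1 : Nat) : Int) := by
          push_cast; omega
        rw [if_neg (by omega), hrec,
            ih (cp + j.toNat + 1) (ln + 1) (by omega) (by omega)]
        have hdd : s.toList.drop (cp + j.toNat + 1) = t.drop (j.toNat + 1) := by
          rw [ht, List.drop_drop]; ring_nf
        rw [hdd]
        -- count identity: take m of t splits at the first newline j
        have hm : (ep - cp).toNat = j.toNat + 1 + (ep - ((cp + j.toNat + 1 : Nat) : Int)).toNat := by
          push_cast; omega
        have hsplit : t.take ((ep - cp).toNat)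
            = t.take (j.toNat + 1) ++ (t.drop (j.toNat + 1)).take ((ep - ((cp + j.toNat + 1 : Nat) : Int)).toNat) := by
          rw [hm, List.take_add, List.take_drop]
        have htj : t.take (j.toNat + 1) = t.take j.toNat ++ ['\n'] := by
          rw [List.take_add_one, List.getElem?_eq_getElem hjlt, hnl]; rfl
        have hc0 : ((t.take j.toNat).count '\n') = 0 :=
          count_take_zero_of_no_nl t j.toNat (fun i hi => hmin i hi)
        rw [hsplit, List.count_append, htj, List.count_append, hc0]
        have h1 : List.count '\n' ['\n'] = 1 := by decide
        rw [h1]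
        push_cast
        omega

lemma alt_closed (s : String) (ep : Int) :
    FindLineNum_alt s ep = 1 + ((s.toList.take ep.toNat).count '\n' : Int) := by
  unfold FindLineNum_alt
  have hmax : max ep 0 = ((ep.toNat : Nat) : Int) := by omega
  rw [hmax, PySem.List.slice_to_natCast, PySem.List.foldl_beq_add_one]

-- ===== VERDICT (by name: the statement is the Claim_ definition above) =====
theorem FindLineNum_spec : Claim_equal_FindLineNum := by
  intro s ep _
  unfold Spec_FindLineNum FindLineNum
  have h0 : ((0 : Nat) : Int) = (0 : Int) := rfl
  rw [← h0, loop_eq s ep s.toList.length 0 1 (by omega) (by omega), alt_closed]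
  simp
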